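-- pv_equiv track=rewrite | github.com/haipradana/tracko-local-model | action_recognition/action_utils.py | merge_consecutive_predictions
-- ===== SOURCE A (Python) =====
-- def merge_consecutive_predictions(predictions, min_duration_frames=0):
--     """
--     Menggabungkan prediksi aksi yang berurutan dan identik menjadi satu event.
--     Juga memfilter event yang durasinya terlalu pendek.
--     """
--     if not predictions:
--         return []
--
--     merged = []
--     current_event = predictions[0].copy()
--
--     for next_pred in predictions[1:]:
--         if next_pred['pred'] == current_event['pred']:
--             current_event['end'] = next_pred['end']
--         else:
--             merged.append(current_event)
--             current_event = next_pred.copy()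
--
--     merged.append(current_event)
--
--     final_predictions = [
--         event for event in merged
--         if (event['end'] - event['start']) >= min_duration_frames
--     ]
--
--     return final_predictions
-- ===== SOURCE B (Python) =====
-- def merge_consecutive_predictions(predictions, min_duration_frames=0):
--     n = len(predictions)
--     # boundary indices: positions where a new run of identical 'pred' starts
--     starts = [i for i in range(n)
--               if i == 0 or predictions[i]['pred'] != predictions[i - 1]['pred']]
--     events = []
--     for s, nxt in zip(starts, starts[1:] + [n]):
--         event = predictions[s].copy()
--         event['end'] = predictions[nxt - 1]['end']
--         events.append(event)
--     return [e for e in events if e['end'] - e['start'] >= min_duration_frames]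
-- ===== Notes on version B (the rewrite author's own statement) =====
-- stated objective: alternative
-- what changed: A does a single pass with a mutable current-event accumulator that it repeatedly updates and flushes; B instead first computes the list of run-boundary indices with a comprehension over range(n), then builds each event in one step by zipping consecutive boundaries and filters.
import Mathlib
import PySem

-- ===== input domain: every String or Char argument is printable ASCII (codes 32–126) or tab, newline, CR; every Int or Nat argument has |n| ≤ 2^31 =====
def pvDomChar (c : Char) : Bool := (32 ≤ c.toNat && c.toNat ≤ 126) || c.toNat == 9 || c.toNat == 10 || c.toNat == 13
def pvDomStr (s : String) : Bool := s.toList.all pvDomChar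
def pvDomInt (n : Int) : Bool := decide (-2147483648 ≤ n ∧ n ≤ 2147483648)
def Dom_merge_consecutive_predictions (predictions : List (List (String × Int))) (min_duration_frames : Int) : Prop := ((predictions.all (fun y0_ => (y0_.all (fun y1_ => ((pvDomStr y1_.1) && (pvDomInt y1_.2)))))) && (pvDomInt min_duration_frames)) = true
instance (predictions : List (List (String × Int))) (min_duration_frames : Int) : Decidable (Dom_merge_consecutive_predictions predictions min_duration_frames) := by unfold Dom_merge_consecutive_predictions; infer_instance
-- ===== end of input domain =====

-- B replaces A's mutable current-event accumulator pass by a staged, index-based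
-- construction: first the list of run-boundary indices, then events built by pairing
-- consecutive boundaries (objective: alternative decomposition; same cost).
-- Dicts are association lists; d['k'] / d['k'] = v are ported with PySem.Dict (first-match
-- lookup, overwrite-in-place assignment); .copy() on an immutable list is the identity.

-- d[k] (Python raises KeyError when k is absent; such inputs are excluded by Pre_, the
-- default 0 is never read there)
def pvGet (d : List (String × Int)) (k : String) : Int := (PySem.Dict.mk d).getD k 0
-- d[k] = v
def pvSet (d : List (String × Int)) (k : String) (v : Int) : List (String × Int) :=
  ((PySem.Dict.mk d).insert k v).items

-- ===== PORT A =====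
def merge_consecutive_predictions (predictions : List (List (String × Int))) (min_duration_frames : Int) : List (List (String × Int)) :=
  match predictions with
  | [] => []
  | p0 :: rest =>
    -- for next_pred in predictions[1:], state = (merged, current_event)
    let st := rest.foldl
      (fun (st : List (List (String × Int)) × List (String × Int)) next_pred =>
        if pvGet next_pred "pred" == pvGet st.2 "pred" then
          (st.1, pvSet st.2 "end" (pvGet next_pred "end"))
        else
          (st.1 ++ [st.2], next_pred))
      ([], p0)
    let merged := st.1 ++ [st.2]
    merged.filter (fun event => decide (pvGet event "end" - pvGet event "start" ≥ min_duration_frames))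

-- ===== PORT B =====
-- the comprehension's condition: i starts a new run of identical 'pred'
def pvCond (predictions : List (List (String × Int))) (i : Nat) : Bool :=
  i == 0 || !(pvGet (predictions.getD i []) "pred" == pvGet (predictions.getD (i - 1) []) "pred")

-- event = predictions[s].copy(); event['end'] = predictions[nxt-1]['end']
def pvEvent (predictions : List (List (String × Int))) (s nxt : Nat) : List (String × Int) :=
  pvSet (predictions.getD s []) "end" (pvGet (predictions.getD (nxt - 1) []) "end")

def merge_consecutive_predictions_alt (predictions : List (List (String × Int))) (min_duration_frames : Int) : List (List (String × Int)) :=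
  let n := predictions.length
  let starts := (List.range n).filter (pvCond predictions)
  let events := (starts.zip (starts.tail ++ [n])).map (fun p => pvEvent predictions p.1 p.2)
  events.filter (fun e => decide (pvGet e "end" - pvGet e "start" ≥ min_duration_frames))

-- ===== PRECONDITION & SPEC =====
-- Pre_ excludes (a) dicts missing one of the keys 'pred'/'start'/'end' — A raises KeyError on
-- almost all such inputs, though on a few degenerate ones (e.g. 'pred' missing from a
-- single-element list) A still returns — and (b) association lists with duplicate keys,
-- which a Python dict cannot represent (no Python input reaches them).
def Pre_merge_consecutive_predictions (predictions : List (List (String × Int))) (min_duration_frames : Int) : Prop :=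
  ∀ d ∈ predictions, (d.map Prod.fst).Nodup ∧ "pred" ∈ d.map Prod.fst ∧
    "start" ∈ d.map Prod.fst ∧ "end" ∈ d.map Prod.fst
instance (predictions : List (List (String × Int))) (min_duration_frames : Int) : Decidable (Pre_merge_consecutive_predictions predictions min_duration_frames) := by unfold Pre_merge_consecutive_predictions; infer_instance

def pvWitness_merge_consecutive_predictions : (List (List (String × Int))) × Int :=
  ([[("pred", 1), ("start", 0), ("end", 4)], [("pred", 1), ("start", 5), ("end", 9)],
    [("pred", 2), ("start", 10), ("end", 11)]], 3)

def Spec_merge_consecutive_predictions (predictions : List (List (String × Int))) (min_duration_frames : Int) (out : List (List (String × Int))) : Prop := out = merge_consecutive_predictions_alt predictions min_duration_frames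
instance (predictions : List (List (String × Int))) (min_duration_frames : Int) (out : List (List (String × Int))) : Decidable (Spec_merge_consecutive_predictions predictions min_duration_frames out) := by unfold Spec_merge_consecutive_predictions; infer_instance

-- ===== CLAIM (what is proved, stated in full; the proofs are below) =====
def Claim_equal_merge_consecutive_predictions : Prop := ∀ (predictions : List (List (String × Int))) (min_duration_frames : Int), Dom_merge_consecutive_predictions predictions min_duration_frames → Pre_merge_consecutive_predictions predictions min_duration_frames → Spec_merge_consecutive_predictions predictions min_duration_frames (merge_consecutive_predictions predictions min_duration_frames)

-- ===== LEMMAS AND PROOFS =====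

-- ---- dict lemmas ----
def GoodKey (d : List (String × Int)) (k : String) : Prop :=
  (d.map Prod.fst).Nodup ∧ k ∈ d.map Prod.fst

theorem mk_items_eta {κ ν : Type} (d : PySem.Dict κ ν) : PySem.Dict.mk d.items = d := rfl

theorem pvGet_pvSet_ne (d : List (String × Int)) (k k' : String) (v : Int) (h : k' ≠ k) :
    pvGet (pvSet d k v) k' = pvGet d k' := by
  simp [pvGet, pvSet, mk_items_eta, PySem.Dict.getD_insert, h]

theorem pvGet_pvSet_self (d : List (String × Int)) (k : String) (v : Int) :
    pvGet (pvSet d k v) k = v := by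
  simp [pvGet, pvSet, mk_items_eta, PySem.Dict.getD_insert]

theorem map_self_of_fix {α : Type} (l : List α) (f : α → α) (h : ∀ a ∈ l, f a = a) : l.map f = l := by
  conv_rhs => rw [← List.map_id l]
  exact List.map_congr_left h

theorem dict_insert_insert {κ ν : Type} [BEq κ] [LawfulBEq κ] (d : PySem.Dict κ ν) (k : κ) (v w : ν) :
    (d.insert k v).insert k w = d.insert k w := by
  apply PySem.Dict.ext
  rw [PySem.Dict.items_insert, PySem.Dict.items_insert, PySem.Dict.items_insert]
  by_cases hc : d.contains k = true
  · have h2 : (d.insert k v).contains k = true := PySem.Dict.contains_insert_self d k v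
    simp only [hc, h2, if_true, PySem.Dict.items_insert, hc, if_true, List.map_map]
    apply List.map_congr_left
    intro p _
    by_cases hp : (p.1 == k) = true <;> simp [Function.comp, hp]
  · have h2 : (d.insert k v).contains k = true := PySem.Dict.contains_insert_self d k v
    simp only [hc, h2, if_true, if_false, PySem.Dict.items_insert, hc, if_false, List.map_append]
    have hmap : d.items.map (fun p => if (p.1 == k) = true then (k, w) else p) = d.items := by
      apply map_self_of_fix
      intro p hp
      have : p.1 ∈ d.keys := by
        simp only [PySem.Dict.keys]; exact List.mem_map_of_mem hp
      by_cases h : (p.1 == k) = true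
      · exact absurd ((PySem.Dict.contains_iff_mem_keys d k).2 (by rwa [eq_of_beq h] at this)) hc
      · simp [h]
    simp [hmap]

theorem keys_eq (d : List (String × Int)) : (PySem.Dict.mk d).keys = d.map Prod.fst := by
  simp [PySem.Dict.keys]

theorem pvSet_pvSet (d : List (String × Int)) (k : String) (v w : Int) :
    pvSet (pvSet d k v) k w = pvSet d k w := by
  simp only [pvSet, mk_items_eta, dict_insert_insert]

theorem pvSet_get_self (d : List (String × Int)) (k : String) (h : GoodKey d k) :
    pvSet d k (pvGet d k) = d := by
  obtain ⟨hnd, hk⟩ := h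
  have hc : (PySem.Dict.mk d).contains k = true := by
    rw [PySem.Dict.contains_iff_mem_keys, keys_eq]; exact hk
  simp only [pvSet, pvGet, PySem.Dict.items_insert, hc, if_true]
  show List.map _ d = d
  apply map_self_of_fix
  intro p hp
  by_cases hpk : (p.1 == k) = true
  · have hk' : p.1 = k := eq_of_beq hpk
    have : (PySem.Dict.mk d).getD k 0 = p.2 := by
      apply PySem.Dict.getD_of_mem_items
      · show (k, p.2) ∈ d; rw [← hk']; exact hp
      · rw [keys_eq]; exact hnd
    rw [if_pos hpk, this, ← hk']
  · simp [hpk]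

theorem goodKey_pvSet (d : List (String × Int)) (k k' : String) (v : Int) (h : GoodKey d k)
    (h' : GoodKey d k') : GoodKey (pvSet d k' v) k := by
  obtain ⟨hnd, hk⟩ := h
  have hc : (PySem.Dict.mk d).contains k' = true := by
    rw [PySem.Dict.contains_iff_mem_keys, keys_eq]; exact h'.2
  have hkeys : (pvSet d k' v).map Prod.fst = d.map Prod.fst := by
    simpa [pvSet, PySem.Dict.keys] using PySem.Dict.keys_insert_of_contains (PySem.Dict.mk d) v hc
  rw [GoodKey, hkeys]; exact ⟨hnd, hk⟩

-- ---- A's loop as a structural recursion ----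
def aLoop (cur : List (String × Int)) : List (List (String × Int)) → List (List (String × Int))
  | [] => [cur]
  | p :: ps =>
    if pvGet p "pred" == pvGet cur "pred" then aLoop (pvSet cur "end" (pvGet p "end")) ps
    else cur :: aLoop p ps

theorem foldA (ps : List (List (String × Int))) :
    ∀ (merged : List (List (String × Int))) (cur : List (String × Int)),
    (let st := ps.foldl
      (fun (st : List (List (String × Int)) × List (String × Int)) next_pred =>
        if pvGet next_pred "pred" == pvGet st.2 "pred" then
          (st.1, pvSet st.2 "end" (pvGet next_pred "end"))
        else
          (st.1 ++ [st.2], next_pred))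
      (merged, cur)
     st.1 ++ [st.2]) = merged ++ aLoop cur ps := by
  induction ps with
  | nil => intro merged cur; simp [aLoop]
  | cons p ps ih =>
    intro merged cur
    simp only [List.foldl_cons, aLoop]
    by_cases h : (pvGet p "pred" == pvGet cur "pred") = true
    · simp only [h, if_true]
      exact ih merged (pvSet cur "end" (pvGet p "end"))
    · simp only [h, if_false, Bool.false_eq_true]
      rw [ih (merged ++ [cur]) p]
      simp

-- ---- the run view both sides are reduced to ----
def bGo : List (List (String × Int)) → List (List (String × Int))
  | [] => []
  | p :: ps =>
    let run := ps.takeWhile (fun q => pvGet q "pred" == pvGet p "pred")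
    pvSet p "end" (pvGet (run.getLastD p) "end")
      :: bGo (ps.dropWhile (fun q => pvGet q "pred" == pvGet p "pred"))
termination_by l => l.length
decreasing_by have := List.length_dropWhile_le (fun q => pvGet q "pred" == pvGet p "pred") ps; simp; omega

theorem dropWhile_eq_drop (p : α → Bool) (l : List α) :
    l.dropWhile p = l.drop (l.takeWhile p).length := by
  have h : l.drop (l.takeWhile p).length = (l.takeWhile p ++ l.dropWhile p).drop (l.takeWhile p).length := by
    rw [List.takeWhile_append_dropWhile]
  rw [h, List.drop_left]

theorem getLastD_eq_getLast {α : Type} (l : List α) (d : α) (h : l ≠ []) :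
    l.getLastD d = l.getLast h := by
  cases l with
  | nil => exact absurd rfl h
  | cons a l => simp [List.getLastD_eq_getLast?, List.getLast?_eq_some_getLast]

-- ---- B's run scan, index form ----
def pvRunEnd (predictions : List (List (String × Int))) (pr : Int) (j : Nat) : Nat :=
  if j + 1 < predictions.length && (pvGet (predictions.getD (j + 1) []) "pred" == pr) then
    pvRunEnd predictions pr (j + 1)
  else j
termination_by predictions.length - j
decreasing_by simp_all; omega

theorem pvRunEnd_ge (predictions : List (List (String × Int))) (pr : Int) (j : Nat) :
    j ≤ pvRunEnd predictions pr j := by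
  fun_induction pvRunEnd <;> omega

def pvOuter (predictions : List (List (String × Int))) (i : Nat) : List (List (String × Int)) :=
  if i < predictions.length then
    let pr := pvGet (predictions.getD i []) "pred"
    let j := pvRunEnd predictions pr i
    let ev := pvSet (predictions.getD i []) "end" (pvGet (predictions.getD j []) "end")
    ev :: pvOuter predictions (j + 1)
  else []
termination_by predictions.length - i
decreasing_by have := pvRunEnd_ge predictions (pvGet (predictions.getD i []) "pred") i; omega

theorem pvRunEnd_eq (predictions : List (List (String × Int))) (pr : Int) (j : Nat) :
    pvRunEnd predictions pr j =
      j + ((predictions.drop (j + 1)).takeWhile (fun q => pvGet q "pred" == pr)).length := by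
  fun_induction pvRunEnd with
  | case1 j h ih =>
    rw [ih]
    simp only [Bool.and_eq_true, decide_eq_true_eq] at h
    obtain ⟨h1, h2⟩ := h
    rw [List.getD_eq_getElem _ _ h1] at h2
    rw [List.drop_eq_getElem_cons h1, List.takeWhile_cons, h2]
    simp; omega
  | case2 j h =>
    simp only [Bool.and_eq_true, decide_eq_true_eq, not_and] at h
    by_cases h1 : j + 1 < predictions.length
    · have h2 := h h1
      rw [List.drop_eq_getElem_cons h1, List.takeWhile_cons, List.getD_eq_getElem _ _ h1] at *
      simp [h2]
    · rw [List.drop_eq_nil_of_le (by omega)]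
      simp

theorem pvRunEnd_lt (predictions : List (List (String × Int))) (pr : Int) (j : Nat)
    (h : j < predictions.length) : pvRunEnd predictions pr j < predictions.length := by
  fun_induction pvRunEnd with
  | case1 j hh ih =>
    simp only [Bool.and_eq_true, decide_eq_true_eq] at hh
    exact ih hh.1
  | case2 j hh => exact h

theorem pvOuter_eq (predictions : List (List (String × Int))) (i : Nat) :
    pvOuter predictions i = bGo (predictions.drop i) := by
  fun_induction pvOuter with
  | case2 i h =>
    rw [List.drop_eq_nil_of_le (by omega)]
    simp [bGo]
  | case1 i h pr j ev ih =>
    rw [ih]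
    have hget : predictions.getD i [] = predictions[i] := List.getD_eq_getElem _ _ h
    rw [List.drop_eq_getElem_cons h]
    simp only [bGo]
    set run := (predictions.drop (i + 1)).takeWhile
      (fun q => pvGet q "pred" == pvGet predictions[i] "pred") with hrun
    have hj : j = i + run.length := by
      show pvRunEnd predictions pr i = i + run.length
      rw [pvRunEnd_eq]
      have hpr : pr = pvGet predictions[i] "pred" := by
        show pvGet (predictions.getD i []) "pred" = _
        rw [hget]
      rw [hpr, hrun]
    have hlen : run.length ≤ predictions.length - (i + 1) := by
      have h1 := (List.takeWhile_sublist
        (fun q => pvGet q "pred" == pvGet predictions[i] "pred") (l := predictions.drop (i + 1))).length_le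
      rw [← hrun] at h1
      simp at h1; omega
    congr 1
    · show pvSet (predictions.getD i []) "end" (pvGet (predictions.getD j []) "end") = _
      rw [hget, hj]
      congr 2
      cases hr : run with
      | nil => simp [List.getElem?_eq_getElem h]
      | cons r rs =>
        have hne : run ≠ [] := by rw [hr]; simp
        rw [← hr]
        have hjlt : i + run.length < predictions.length := by
          rw [hr] at hlen ⊢; simp at hlen ⊢; omega
        rw [List.getD_eq_getElem _ _ hjlt]
        rw [getLastD_eq_getLast run _ hne, List.getLast_eq_getElem]
        have hpre : run <+: predictions.drop (i + 1) := by rw [hrun]; exact List.takeWhile_prefix _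
        have hlt : run.length - 1 < run.length := by rw [hr]; simp
        rw [hpre.getElem hlt, List.getElem_drop]
        congr 1
        rw [hr]; simp; omega
    · rw [hj, dropWhile_eq_drop, ← hrun]
      congr 1
      rw [List.drop_drop]
      congr 1
      omega

theorem aLoop_eq_bGo (ps : List (List (String × Int))) :
    ∀ cur, GoodKey cur "end" → (∀ d ∈ ps, GoodKey d "end") →
    aLoop cur ps = bGo (cur :: ps) := by
  induction ps with
  | nil =>
    intro cur hcur _
    simp only [aLoop, bGo, List.takeWhile_nil, List.dropWhile_nil, List.getLastD_nil]
    rw [pvSet_get_self cur "end" hcur]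
  | cons p ps ih =>
    intro cur hcur hps
    by_cases h : (pvGet p "pred" == pvGet cur "pred") = true
    · have hcur' : GoodKey (pvSet cur "end" (pvGet p "end")) "end" :=
        goodKey_pvSet cur "end" "end" (pvGet p "end") hcur hcur
      have step : aLoop cur (p :: ps) = aLoop (pvSet cur "end" (pvGet p "end")) ps := by
        simp [aLoop, h]
      rw [step, ih _ hcur' (fun d hd => hps d (by simp [hd]))]
      simp only [bGo, List.takeWhile_cons, List.dropWhile_cons]
      have hpred : pvGet (pvSet cur "end" (pvGet p "end")) "pred" = pvGet cur "pred" :=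
        pvGet_pvSet_ne cur "end" "pred" (pvGet p "end") (by decide)
      rw [hpred, h]
      simp only [if_true]
      congr 1
      set run := ps.takeWhile (fun q => pvGet q "pred" == pvGet cur "pred") with hrun
      cases hr : run with
      | nil =>
        simp only [List.getLastD_nil, List.getLastD_cons]
        rw [pvGet_pvSet_self, pvSet_pvSet]
      | cons r rs =>
        have hne : run ≠ [] := by rw [hr]; simp
        rw [← hr, List.getLastD_cons]
        rw [getLastD_eq_getLast run _ hne, getLastD_eq_getLast run _ hne, pvSet_pvSet]
    · have step : aLoop cur (p :: ps) = cur :: aLoop p ps := by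
        simp [aLoop, h]
      rw [step, ih p (hps p (by simp)) (fun d hd => hps d (by simp [hd]))]
      simp only [bGo, List.takeWhile_cons, List.dropWhile_cons, h]
      simp only [Bool.false_eq_true, if_false, List.getLastD_nil]
      rw [pvSet_get_self cur "end" hcur]
      congr 1
      simp only [bGo]

-- ---- reducing B's boundary-index construction to pvOuter ----
def SB (P : List (List (String × Int))) (i : Nat) : List Nat :=
  (List.range' i (P.length - i)).filter (pvCond P)

def buildB (P : List (List (String × Int))) (s : List Nat) : List (List (String × Int)) :=
  (s.zip (s.tail ++ [P.length])).map (fun p => pvEvent P p.1 p.2)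

theorem buildB_cons (P : List (List (String × Int))) (i : Nat) (s : List Nat) :
    buildB P (i :: s) = pvEvent P i ((s ++ [P.length]).headD 0) :: buildB P s := by
  cases s <;> simp [buildB]

theorem takeWhile_stop {α : Type} (p : α → Bool) (l : List α)
    (h : (l.takeWhile p).length < l.length) :
    p (l[(l.takeWhile p).length]'h) = false := by
  induction l with
  | nil => simp at h
  | cons a t ih =>
    by_cases hp : p a
    · simp only [List.takeWhile_cons, hp, if_true, List.length_cons] at h ⊢
      simpa using ih (by omega)
    · simp [List.takeWhile_cons, hp]

theorem run_pred (P : List (List (String × Int))) (pr : Int) (i k : Nat)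
    (h1 : i + 1 ≤ k) (h2 : k ≤ pvRunEnd P pr i) (hk : k < P.length) :
    pvGet (P.getD k []) "pred" = pr := by
  have hj := pvRunEnd_eq P pr i
  set tw := (P.drop (i + 1)).takeWhile (fun q => pvGet q "pred" == pr) with htw
  have hm : k - (i + 1) < tw.length := by omega
  have hpre : tw <+: P.drop (i + 1) := by rw [htw]; exact List.takeWhile_prefix _
  have hdlt : k - (i + 1) < (P.drop (i + 1)).length := lt_of_lt_of_le hm hpre.length_le
  have e1 : tw[k - (i + 1)]'hm = (P.drop (i + 1))[k - (i + 1)]'hdlt := hpre.getElem hm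
  have e2 : (P.drop (i + 1))[k - (i + 1)]'hdlt = P[k]'hk := by
    rw [List.getElem_drop]
    exact getElem_congr (c := P) rfl (by omega) (by omega)
  have hmem : P[k]'hk ∈ tw := by
    rw [← e2, ← e1]; exact List.getElem_mem hm
  have := List.mem_takeWhile_imp (htw ▸ hmem)
  rw [List.getD_eq_getElem _ _ hk]
  exact eq_of_beq this

theorem buildB_SB (P : List (List (String × Int))) (i : Nat) :
    pvCond P i = true → buildB P (SB P i) = pvOuter P i := by
  fun_induction pvOuter P i with
  | case2 i h =>
    intro _
    have : P.length - i = 0 := by omega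
    simp [SB, buildB, this]
  | case1 i h pr j ev ih =>
    intro hc
    have hjge : i ≤ j := pvRunEnd_ge P pr i
    have hjlt : j < P.length := pvRunEnd_lt P pr i h
    have hL := pvRunEnd_eq P pr i
    set L := ((P.drop (i + 1)).takeWhile (fun q => pvGet q "pred" == pr)).length with hLdef
    -- pred value at every index of the run equals pr
    have hrunp : ∀ k, i ≤ k → k ≤ j → pvGet (P.getD k []) "pred" = pr := by
      intro k hk1 hk2
      rcases Nat.eq_or_lt_of_le hk1 with he | hlt
      · subst he; rfl
      · exact run_pred P pr i k hlt hk2 (lt_of_le_of_lt hk2 hjlt)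
    -- indices strictly inside the run fail pvCond
    have hmid : ∀ k ∈ List.range' (i + 1) (j - i), ¬ pvCond P k = true := by
      intro k hkmem
      rw [List.mem_range'] at hkmem
      obtain ⟨m, hm, hke⟩ := hkmem
      have hk1 : i + 1 ≤ k := by omega
      have hk2 : k ≤ j := by omega
      have e1 : pvGet (P.getD k []) "pred" = pr := hrunp k (by omega) hk2
      have e2 : pvGet (P.getD (k - 1) []) "pred" = pr := hrunp (k - 1) (by omega) (by omega)
      have ec : pvCond P k = ((k == 0) || !(pr == pr)) := by rw [pvCond, e1, e2]
      simp [ec, show k ≠ 0 by omega]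
    -- SB P i = i :: SB P (j+1)
    have hSi : SB P i = i :: SB P (j + 1) := by
      unfold SB
      have hlen : P.length - i = (P.length - i - 1) + 1 := by omega
      rw [hlen, List.range'_succ, List.filter_cons_of_pos hc]
      congr 1
      have hsplit : List.range' (i + 1) (P.length - i - 1) =
          List.range' (i + 1) (j - i) ++ List.range' (j + 1) (P.length - (j + 1)) := by
        have := List.range'_append (s := i + 1) (m := j - i) (n := P.length - (j + 1)) (step := 1)
        rw [show (i + 1) + 1 * (j - i) = j + 1 by omega] at this
        rw [show (j - i) + (P.length - (j + 1)) = P.length - i - 1 by omega] at this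
        exact this.symm
      rw [hsplit, List.filter_append, List.filter_eq_nil_iff.2 hmid, List.nil_append]
    -- if j+1 is in range it satisfies pvCond
    have hcnext : j + 1 < P.length → pvCond P (j + 1) = true := by
      intro hlt
      have hLlt : L < (P.drop (i + 1)).length := by
        rw [List.length_drop]; omega
      have hstop := takeWhile_stop (fun q => pvGet q "pred" == pr) (P.drop (i + 1)) hLlt
      have e2 : (P.drop (i + 1))[L]'hLlt = P[j + 1]'hlt := by
        rw [List.getElem_drop]
        exact getElem_congr (c := P) rfl (by omega) (by omega)
      rw [e2] at hstop
      have e3 : pvGet (P.getD (j + 1) []) "pred" ≠ pr := by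
        rw [List.getD_eq_getElem _ _ hlt]
        intro he
        rw [he] at hstop; simp at hstop
      have e4 : pvGet (P.getD j []) "pred" = pr := hrunp j hjge le_rfl
      have ec : pvCond P (j + 1) = ((j + 1 == 0) || !(pvGet (P.getD (j + 1) []) "pred" == pr)) := by
        rw [pvCond]; simp only [Nat.add_sub_cancel, e4]
      rw [ec]
      have e5 : (pvGet (P.getD (j + 1) []) "pred" == pr) = false := by
        simpa using e3
      rw [e5]
      rfl
    -- head of the remaining boundary list is j+1 (or the sentinel length)
    have hhead : ((SB P (j + 1) ++ [P.length]).headD 0) = j + 1 := by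
      by_cases hlt : j + 1 < P.length
      · have : SB P (j + 1) = (j + 1) :: (List.range' (j + 2) (P.length - (j + 2))).filter (pvCond P) := by
          unfold SB
          rw [show P.length - (j + 1) = (P.length - (j + 2)) + 1 by omega, List.range'_succ,
            List.filter_cons_of_pos (hcnext hlt)]
        rw [this]; rfl
      · have hje : j + 1 = P.length := by omega
        have : SB P (j + 1) = [] := by
          unfold SB
          rw [show P.length - (j + 1) = 0 by omega]
          rfl
        rw [this, hje]; rfl
    -- the tail matches pvOuter's recursion
    have htail : buildB P (SB P (j + 1)) = pvOuter P (j + 1) := by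
      by_cases hlt : j + 1 < P.length
      · exact ih (hcnext hlt)
      · have h1 : SB P (j + 1) = [] := by
          unfold SB
          rw [show P.length - (j + 1) = 0 by omega]; rfl
        rw [h1]
        rw [pvOuter]
        simp [hlt, buildB]
    rw [hSi, buildB_cons, hhead, htail]
    congr 1

theorem alt_eq (P : List (List (String × Int))) (m : Int) :
    merge_consecutive_predictions_alt P m =
      (pvOuter P 0).filter (fun e => decide (pvGet e "end" - pvGet e "start" ≥ m)) := by
  unfold merge_consecutive_predictions_alt
  rw [← buildB_SB P 0 (by simp [pvCond])]
  simp only [SB, buildB, List.range_eq_range', Nat.sub_zero]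

-- ===== VERDICT (by name: the statement is the Claim_ definition above) =====
theorem merge_consecutive_predictions_spec : Claim_equal_merge_consecutive_predictions := by
  intro predictions min_duration_frames _ hpre
  unfold Spec_merge_consecutive_predictions
  rw [alt_eq, pvOuter_eq]
  cases predictions with
  | nil => simp [merge_consecutive_predictions, bGo]
  | cons p0 rest =>
    unfold merge_consecutive_predictions
    simp only [List.drop_zero]
    rw [foldA, ← aLoop_eq_bGo]
    · simp
    · exact ⟨(hpre p0 (by simp)).1, (hpre p0 (by simp)).2.2.2⟩
    · intro d hd; exact ⟨(hpre d (by simp [hd])).1, (hpre d (by simp [hd])).2.2.2⟩
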